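-- pv_equiv track=rewrite | github.com/sevoster/Multicriteria-knapsack-problem | core/table.py | vector_filter
-- ===== SOURCE A (Python) =====
-- def vector_filter(variety):
--     """Remove same or least vectors"""
--     result = []
--     for vectors in variety:
--         not_bad = True
--         for vector2 in variety:
--             if (vectors[0] <= vector2[0] and vectors[1] < vector2[1]) or \
--                     (vectors[0] < vector2[0] and vectors[1] <= vector2[1]):
--                 not_bad = False
--         if not_bad:
--             if vectors not in result:
--                 result.append(vectors)
--     return result
-- ===== SOURCE B (Python) =====
-- def vector_filter(variety):
--     """Remove same or least vectors (sort distinct x values, suffix-max sweep)"""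
--     best = {}
--     for v in variety:
--         x, y = v[0], v[1]
--         if x not in best or best[x] < y:
--             best[x] = y
--     suff = {}
--     m = None
--     for x in sorted(best, reverse=True):
--         suff[x] = m
--         bx = best[x]
--         m = bx if m is None or m < bx else m
--     out = []
--     seen = set()
--     for v in variety:
--         x, y = v[0], v[1]
--         s = suff[x]
--         dominated = (s is not None and y <= s) or y < best[x]
--         if not dominated:
--             t = tuple(v)
--             if t not in seen:
--                 out.append(v)
--                 seen.add(t)
--     return out
-- ===== Notes on version B (the rewrite author's own statement) =====
-- stated objective: alternative
-- what changed: A's all-pairs dominance scan is replaced by one pass building a dict of the best y per distinct x, a descending sort of those distinct x's with a suffix-max sweep that decides dominance per vector without an inner scan, and a final pass emitting survivors in original order with set-based dedup.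
import Mathlib
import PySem

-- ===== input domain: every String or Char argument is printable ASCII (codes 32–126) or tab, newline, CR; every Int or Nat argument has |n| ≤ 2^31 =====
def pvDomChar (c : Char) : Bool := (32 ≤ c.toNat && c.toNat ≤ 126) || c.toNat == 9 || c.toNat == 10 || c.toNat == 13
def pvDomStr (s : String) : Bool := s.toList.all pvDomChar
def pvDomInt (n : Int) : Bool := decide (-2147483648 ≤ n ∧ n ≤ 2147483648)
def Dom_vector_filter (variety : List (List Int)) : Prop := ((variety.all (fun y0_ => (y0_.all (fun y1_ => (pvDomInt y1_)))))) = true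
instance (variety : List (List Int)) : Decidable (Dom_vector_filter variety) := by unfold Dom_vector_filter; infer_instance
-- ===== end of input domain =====

-- B replaces A's all-pairs dominance scan by a best-y-per-x dict, a descending sort of the
-- distinct first coordinates with a suffix-max sweep, and one final dedup pass (objective: alternative).

-- shared helper: v[0] and v[1] (exact under Pre_, which guarantees the indices are in range)
def pvX (v : List Int) : Int := PySem.List.pyGetD v 0 0
def pvY (v : List Int) : Int := PySem.List.pyGetD v 1 0

-- ===== PORT A =====
def vector_filter (variety : List (List Int)) : List (List Int) :=
  variety.foldl (fun result vectors =>
    let not_bad := variety.foldl (fun not_bad vector2 =>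
      if (pvX vectors ≤ pvX vector2 ∧ pvY vectors < pvY vector2) ∨
         (pvX vectors < pvX vector2 ∧ pvY vectors ≤ pvY vector2) then false else not_bad) true
    if not_bad then (if vectors ∈ result then result else result ++ [vectors]) else result) []

-- ===== PORT B =====
-- phase 1: best[x] = largest y among vectors with first coordinate x
def pvBest (variety : List (List Int)) : PySem.Dict Int Int :=
  variety.foldl (fun best v =>
    if best.contains (pvX v) = false ∨ best.getD (pvX v) 0 < pvY v
    then best.insert (pvX v) (pvY v) else best) PySem.Dict.empty

-- phase 2: suff[x] = None or the largest best[x'] over keys x' > x (suffix max over descending sorted keys)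
-- (Python's best[x] cannot raise here — x is iterated over best's keys — so it is ported as getD _ 0)
def pvSuff (variety : List (List Int)) : PySem.Dict Int (Option Int) :=
  ((PySem.List.sorted (pvBest variety).keys (fun x => x) true).foldl
    (fun (p : PySem.Dict Int (Option Int) × Option Int) x =>
      (p.1.insert x p.2,
       match p.2 with
       | none => some ((pvBest variety).getD x 0)
       | some mv => if mv < (pvBest variety).getD x 0
                    then some ((pvBest variety).getD x 0) else some mv))
    (PySem.Dict.empty, none)).1

-- phase 3: keep the non-dominated vectors, first occurrences only
-- (Python's suff[x] / best[x] cannot raise — every x = v[0] is a key of best — ported as (get? _).getD none / getD _ 0)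
def vector_filter_alt (variety : List (List Int)) : List (List Int) :=
  (variety.foldl (fun (p : List (List Int) × PySem.Set (List Int)) v =>
    let s := ((pvSuff variety).get? (pvX v)).getD none
    let dominated := (match s with | some sv => decide (pvY v ≤ sv) | none => false)
                     || decide (pvY v < (pvBest variety).getD (pvX v) 0)
    if dominated then p
    else if PySem.Set.contains p.2 v then p
    else (p.1 ++ [v], PySem.Set.add p.2 v)) ([], PySem.Set.empty)).1

-- ===== PRECONDITION & SPEC =====
-- Pre_: Python's vectors[0]/vectors[1] raise IndexError on an inner list shorter than 2
def Pre_vector_filter (variety : List (List Int)) : Prop := ∀ v ∈ variety, 2 ≤ v.length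
instance (variety : List (List Int)) : Decidable (Pre_vector_filter variety) := by
  unfold Pre_vector_filter; infer_instance
def pvWitness_vector_filter : List (List Int) := [[1, 2], [3, 0], [3, 0], [2, 2]]
def Spec_vector_filter (variety : List (List Int)) (out : List (List Int)) : Prop := out = vector_filter_alt variety
instance (variety : List (List Int)) (out : List (List Int)) : Decidable (Spec_vector_filter variety out) := by unfold Spec_vector_filter; infer_instance

-- ===== CLAIM (what is proved, stated in full; the proofs are below) =====
def Claim_equal_vector_filter : Prop := ∀ (variety : List (List Int)), Dom_vector_filter variety → Pre_vector_filter variety → Spec_vector_filter variety (vector_filter variety)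

-- ===== LEMMAS AND PROOFS =====

-- v is dominated by some vector of variety (A's inner-loop condition)
def pvBad (variety : List (List Int)) (v : List Int) : Bool :=
  variety.any (fun w => decide ((pvX v ≤ pvX w ∧ pvY v < pvY w) ∨ (pvX v < pvX w ∧ pvY v ≤ pvY w)))

-- max of two optional ints (none = -infinity)
def pvOmax : Option Int → Option Int → Option Int
  | none, b => b
  | some a, none => some a
  | some a, some b => some (max a b)

-- the largest pvY among vectors of l with pvX = x, as an Option
def pvYMax (l : List (List Int)) (x : Int) : Option Int :=
  l.foldr (fun v acc => if pvX v = x then pvOmax (some (pvY v)) acc else acc) none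

theorem pvOmax_none_right (a : Option Int) : pvOmax a none = a := by
  cases a <;> rfl

theorem pvOmax_absorb_left {m p : Int} (h : p ≤ m) (Y : Option Int) :
    pvOmax (some m) (pvOmax (some p) Y) = pvOmax (some m) Y := by
  cases Y <;> simp [pvOmax] <;> omega

theorem pvOmax_absorb_right {m p : Int} (h : m ≤ p) (Y : Option Int) :
    pvOmax (some m) (pvOmax (some p) Y) = pvOmax (some p) Y := by
  cases Y <;> simp [pvOmax] <;> omega

theorem pvYMax_cons (v : List Int) (t : List (List Int)) (x : Int) :
    pvYMax (v :: t) x = if pvX v = x then pvOmax (some (pvY v)) (pvYMax t x) else pvYMax t x := rfl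

theorem inner_foldl_eq (variety : List (List Int)) (v : List Int) (b : Bool) :
    variety.foldl (fun not_bad vector2 =>
      if (pvX v ≤ pvX vector2 ∧ pvY v < pvY vector2) ∨
         (pvX v < pvX vector2 ∧ pvY v ≤ pvY vector2) then false else not_bad) b
    = (b && !pvBad variety v) := by
  induction variety generalizing b with
  | nil => simp [pvBad]
  | cons w t ih =>
    rw [List.foldl_cons, ih]
    by_cases h : (pvX v ≤ pvX w ∧ pvY v < pvY w) ∨ (pvX v < pvX w ∧ pvY v ≤ pvY w)
    · have hb : pvBad (w :: t) v = true := by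
        simp only [pvBad, List.any_cons, Bool.or_eq_true]
        exact Or.inl (decide_eq_true h)
      rw [if_pos h, hb]; simp
    · have hb : pvBad (w :: t) v = pvBad t v := by
        simp only [pvBad, List.any_cons, decide_eq_false h, Bool.false_or]
      rw [if_neg h, hb]

theorem vector_filter_eq_fold (variety : List (List Int)) :
    vector_filter variety = variety.foldl (fun res v =>
      if pvBad variety v then res else if v ∈ res then res else res ++ [v]) [] := by
  unfold vector_filter
  congr 1
  funext res v
  simp only [inner_foldl_eq, Bool.true_and]
  cases h : pvBad variety v <;> simp

theorem pvBestF_get? (l : List (List Int)) (d : PySem.Dict Int Int) (x : Int) :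
    (l.foldl (fun best v =>
      if best.contains (pvX v) = false ∨ best.getD (pvX v) 0 < pvY v
      then best.insert (pvX v) (pvY v) else best) d).get? x
    = pvOmax (d.get? x) (pvYMax l x) := by
  induction l generalizing d with
  | nil => simp [pvYMax, pvOmax_none_right]
  | cons v t ih =>
    simp only [List.foldl_cons]
    by_cases hx : pvX v = x
    · subst hx
      rw [pvYMax_cons, if_pos rfl]
      by_cases hc : (d.contains (pvX v) = false ∨ d.getD (pvX v) 0 < pvY v)
      · rw [if_pos hc, ih]
        rw [PySem.Dict.get?_insert_self]
        cases hg : d.get? (pvX v) with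
        | none => rfl
        | some m =>
          rcases hc with hc | hc
          · have hnone : d.get? (pvX v) = none := by
              rw [PySem.Dict.get?_eq_none_iff_contains]; exact hc
            simp [hnone] at hg
          · rw [PySem.Dict.getD_of_get?_eq_some d 0 hg] at hc
            exact (pvOmax_absorb_right (le_of_lt hc) _).symm
      · rw [if_neg hc, ih]
        push Not at hc
        obtain ⟨hcon, hge⟩ := hc
        cases hg : d.get? (pvX v) with
        | none =>
          have := (PySem.Dict.get?_eq_none_iff_contains d (pvX v)).mp hg
          simp_all
        | some m =>
          rw [PySem.Dict.getD_of_get?_eq_some d 0 hg] at hge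
          exact (pvOmax_absorb_left hge _).symm
    · rw [pvYMax_cons, if_neg hx]
      by_cases hc : (d.contains (pvX v) = false ∨ d.getD (pvX v) 0 < pvY v)
      · rw [if_pos hc, ih, PySem.Dict.get?_insert_of_ne _ _ (fun h => hx h.symm)]
      · rw [if_neg hc, ih]

theorem pvBest_get? (variety : List (List Int)) (x : Int) :
    (pvBest variety).get? x = pvYMax variety x := by
  rw [pvBest, pvBestF_get?, PySem.Dict.get?_empty]
  rfl

theorem pvBest_nodup_keys (variety : List (List Int)) : (pvBest variety).keys.Nodup := by
  rw [pvBest]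
  have : ∀ (l : List (List Int)) (d : PySem.Dict Int Int), d.keys.Nodup →
      (l.foldl (fun best v =>
        if best.contains (pvX v) = false ∨ best.getD (pvX v) 0 < pvY v
        then best.insert (pvX v) (pvY v) else best) d).keys.Nodup := by
    intro l
    induction l with
    | nil => intro d hd; exact hd
    | cons v t ih =>
      intro d hd
      simp only [List.foldl_cons]
      split
      · exact ih _ (PySem.Dict.nodup_keys_insert _ _ _ hd)
      · exact ih _ hd
  exact this _ _ PySem.Dict.nodup_keys_empty

theorem pvYMax_eq_none_iff (l : List (List Int)) (x : Int) :
    pvYMax l x = none ↔ ∀ v ∈ l, pvX v ≠ x := by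
  induction l with
  | nil => simp [pvYMax]
  | cons v t ih =>
    rw [pvYMax_cons]
    by_cases hx : pvX v = x
    · rw [if_pos hx]
      constructor
      · intro h; cases hY : pvYMax t x <;> rw [hY] at h <;> simp [pvOmax] at h
      · intro h; exact absurd hx (h v (by simp))
    · rw [if_neg hx]; simp_all

theorem mem_keys_pvBest (variety : List (List Int)) (x : Int) :
    x ∈ (pvBest variety).keys ↔ ∃ v ∈ variety, pvX v = x := by
  constructor
  · intro h
    by_contra hc
    push Not at hc
    have : (pvBest variety).get? x = none := by
      rw [pvBest_get?, pvYMax_eq_none_iff]; exact hc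
    rw [PySem.Dict.get?_eq_none_iff_not_mem_keys] at this
    exact this h
  · rintro ⟨v, hv, rfl⟩
    by_contra h
    rw [← PySem.Dict.get?_eq_none_iff_not_mem_keys, pvBest_get?, pvYMax_eq_none_iff] at h
    exact h v hv rfl

theorem pvYMax_ub (l : List (List Int)) (x : Int) (M : Int) (h : pvYMax l x = some M) :
    ∀ v ∈ l, pvX v = x → pvY v ≤ M := by
  induction l generalizing M with
  | nil => simp
  | cons u t ih =>
    rw [pvYMax_cons] at h
    intro v hv hx
    rcases List.mem_cons.mp hv with rfl | hv'
    · rw [if_pos hx] at h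
      cases hY : pvYMax t x <;> rw [hY] at h <;> simp [pvOmax] at h <;> omega
    · by_cases hu : pvX u = x
      · rw [if_pos hu] at h
        cases hY : pvYMax t x with
        | none => exact absurd hx ((pvYMax_eq_none_iff t x).mp hY v hv')
        | some M' =>
          rw [hY] at h; simp [pvOmax] at h
          have := ih M' hY v hv' hx
          omega
      · rw [if_neg hu] at h
        exact ih M h v hv' hx

theorem pvYMax_attained (l : List (List Int)) (x : Int) (M : Int) (h : pvYMax l x = some M) :
    ∃ v ∈ l, pvX v = x ∧ pvY v = M := by
  induction l generalizing M with
  | nil => simp [pvYMax] at h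
  | cons u t ih =>
    rw [pvYMax_cons] at h
    by_cases hu : pvX u = x
    · rw [if_pos hu] at h
      cases hY : pvYMax t x with
      | none => rw [hY] at h; simp [pvOmax] at h; exact ⟨u, by simp, hu, by omega⟩
      | some M' =>
        rw [hY] at h; simp [pvOmax] at h
        rcases max_choice (pvY u) M' with hm | hm
        · exact ⟨u, by simp, hu, by omega⟩
        · obtain ⟨v, hv, hvx, hvy⟩ := ih M' hY
          exact ⟨v, by simp [hv], hvx, by omega⟩
    · rw [if_neg hu] at h
      obtain ⟨v, hv, hvx, hvy⟩ := ih M h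
      exact ⟨v, by simp [hv], hvx, hvy⟩

theorem pvBest_ub (variety : List (List Int)) (v : List Int) (h : v ∈ variety) :
    pvY v ≤ (pvBest variety).getD (pvX v) 0 := by
  cases hg : (pvBest variety).get? (pvX v) with
  | none =>
    rw [pvBest_get?, pvYMax_eq_none_iff] at hg
    exact absurd rfl (hg v h)
  | some M =>
    rw [PySem.Dict.getD_of_get?_eq_some _ 0 hg]
    rw [pvBest_get?] at hg
    exact pvYMax_ub _ _ _ hg v h rfl

theorem pvBest_attained (variety : List (List Int)) (x : Int) (h : x ∈ (pvBest variety).keys) :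
    ∃ v ∈ variety, pvX v = x ∧ pvY v = (pvBest variety).getD x 0 := by
  cases hg : (pvBest variety).get? x with
  | none => rw [PySem.Dict.get?_eq_none_iff_not_mem_keys] at hg; exact absurd h hg
  | some M =>
    rw [PySem.Dict.getD_of_get?_eq_some _ 0 hg]
    rw [pvBest_get?] at hg
    exact pvYMax_attained _ _ _ hg

-- the suffix-max value stored by pvSuff at a key x of best
def pvAcc (variety : List (List Int)) (x : Int) : Option Int :=
  ((PySem.List.sorted (pvBest variety).keys (fun x => x) true).filter (fun k => decide (x < k))).foldl
    (fun m k => pvOmax m (some ((pvBest variety).getD k 0))) none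

theorem pvOmax_match (m : Option Int) (b : Int) :
    (match m with | none => some b | some mv => if mv < b then some b else some mv)
    = pvOmax m (some b) := by
  cases m with
  | none => rfl
  | some mv => simp only [pvOmax, max_def]; split_ifs <;> simp <;> omega

theorem suffF_get_notmem (best : PySem.Dict Int Int) (x : Int) :
    ∀ (ks : List Int), x ∉ ks → ∀ (d : PySem.Dict Int (Option Int)) (m : Option Int),
    (ks.foldl (fun (p : PySem.Dict Int (Option Int) × Option Int) k =>
      (p.1.insert k p.2,
       match p.2 with
       | none => some (best.getD k 0)
       | some mv => if mv < best.getD k 0 then some (best.getD k 0) else some mv)) (d, m)).1.get? x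
    = d.get? x := by
  intro ks
  induction ks with
  | nil => intro _ d m; rfl
  | cons k t ih =>
    intro hx d m
    simp only [List.foldl_cons]
    rw [ih (fun h => hx (by simp [h])) _ _,
      PySem.Dict.get?_insert_of_ne _ _ (fun h => hx (by simp [h]))]

theorem suffF_get (best : PySem.Dict Int Int) :
    ∀ (ks : List Int), ks.Pairwise (fun a b => b < a) →
    ∀ x ∈ ks, ∀ (d : PySem.Dict Int (Option Int)) (m : Option Int),
    (ks.foldl (fun (p : PySem.Dict Int (Option Int) × Option Int) k =>
      (p.1.insert k p.2,
       match p.2 with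
       | none => some (best.getD k 0)
       | some mv => if mv < best.getD k 0 then some (best.getD k 0) else some mv)) (d, m)).1.get? x
    = some ((ks.filter (fun k => decide (x < k))).foldl
        (fun m k => pvOmax m (some (best.getD k 0))) m) := by
  intro ks
  induction ks with
  | nil => intro _ x hx; simp at hx
  | cons k t ih =>
    intro hp x hx d m
    have hk : ∀ b ∈ t, b < k := fun b hb => (List.pairwise_cons.mp hp).1 b hb
    simp only [List.foldl_cons]
    rcases List.mem_cons.mp hx with rfl | hx
    · have hnx : x ∉ t := fun h => lt_irrefl x (hk x h)
      rw [suffF_get_notmem best x t hnx, PySem.Dict.get?_insert_self _ _ _]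
      have hf : t.filter (fun k => decide (x < k)) = [] :=
        List.filter_eq_nil_iff.mpr (fun b hb => by simp; exact le_of_lt (hk b hb))
      simp [hf]
    · have hxk : x < k := hk x hx
      rw [ih (List.pairwise_cons.mp hp).2 x hx]
      simp only [List.filter_cons, decide_eq_true_eq, if_pos hxk, List.foldl_cons,
        pvOmax_match]

theorem pvSuff_get? (variety : List (List Int)) (x : Int) (h : x ∈ (pvBest variety).keys) :
    (pvSuff variety).get? x = some (pvAcc variety x) := by
  have hperm : (PySem.List.sorted (pvBest variety).keys (fun x => x) true).Perm (pvBest variety).keys :=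
    PySem.List.sorted_perm _ _ _
  have hnd : (PySem.List.sorted (pvBest variety).keys (fun x => x) true).Nodup :=
    hperm.nodup_iff.mpr (pvBest_nodup_keys variety)
  have hle : (PySem.List.sorted (pvBest variety).keys (fun x => x) true).Pairwise
      (fun a b => b ≤ a) := PySem.List.sorted_pairwise_rev _ _
  have hlt : (PySem.List.sorted (pvBest variety).keys (fun x => x) true).Pairwise
      (fun a b => b < a) := (hle.and hnd).imp (fun h => lt_of_le_of_ne h.1 h.2.symm)
  have hmem : x ∈ PySem.List.sorted (pvBest variety).keys (fun x => x) true :=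
    (PySem.List.mem_sorted _ _ _ _).mpr h
  exact suffF_get (pvBest variety) _ hlt x hmem _ _

theorem pvAccF_some (f : Int → Int) (l : List Int) (a : Int) :
    ∃ b, l.foldl (fun m k => pvOmax m (some (f k))) (some a) = some b := by
  induction l generalizing a with
  | nil => exact ⟨a, rfl⟩
  | cons k t ih => simpa [pvOmax] using ih (max a (f k))

theorem pvAcc_eq_none_iff (variety : List (List Int)) (x : Int) :
    pvAcc variety x = none ↔
    (PySem.List.sorted (pvBest variety).keys (fun x => x) true).filter (fun k => decide (x < k)) = [] := by
  rw [pvAcc]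
  cases hf : (PySem.List.sorted (pvBest variety).keys (fun x => x) true).filter (fun k => decide (x < k)) with
  | nil => simp
  | cons k t =>
    simp only [List.foldl_cons]
    obtain ⟨b, hb⟩ := pvAccF_some (fun k => (pvBest variety).getD k 0) t ((pvBest variety).getD k 0)
    have h0 : pvOmax none (some ((pvBest variety).getD k 0)) = some ((pvBest variety).getD k 0) := rfl
    rw [h0, hb]
    simp

theorem pvAccF_spec (f : Int → Int) (l : List Int) :
    ∀ (m : Option Int) (s : Int),
    l.foldl (fun m k => pvOmax m (some (f k))) m = some s →
    (∀ k ∈ l, f k ≤ s) ∧ (∀ a, m = some a → a ≤ s) ∧ (m = some s ∨ ∃ k ∈ l, f k = s) := by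
  induction l with
  | nil => intro m s h; simp at h; simp [h]
  | cons k t ih =>
    intro m s h
    simp only [List.foldl_cons] at h
    obtain ⟨hub, hinit, hatt⟩ := ih (pvOmax m (some (f k))) s h
    have hk : f k ≤ s ∧ (∀ a, m = some a → a ≤ s) := by
      cases m with
      | none => exact ⟨hinit (f k) rfl, by simp⟩
      | some a =>
        have := hinit (max a (f k)) rfl
        exact ⟨by omega, fun a' ha' => by injection ha' with h'; omega⟩
    refine ⟨fun k' hk' => ?_, hk.2, ?_⟩
    · rcases List.mem_cons.mp hk' with rfl | h' 
      · exact hk.1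
      · exact hub k' h'
    · rcases hatt with hatt | ⟨k', hk', hfk⟩
      · cases m with
        | none => simp [pvOmax] at hatt; exact Or.inr ⟨k, by simp, hatt⟩
        | some a =>
          simp [pvOmax] at hatt
          rcases max_choice a (f k) with hm | hm
          · exact Or.inl (by rw [← hatt, hm])
          · exact Or.inr ⟨k, by simp, by omega⟩
      · exact Or.inr ⟨k', by simp [hk'], hfk⟩

theorem dominated_eq_bad (variety : List (List Int)) (v : List Int) (h : v ∈ variety) :
    ((match ((pvSuff variety).get? (pvX v)).getD none with
      | some sv => decide (pvY v ≤ sv) | none => false)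
     || decide (pvY v < (pvBest variety).getD (pvX v) 0)) = pvBad variety v := by
  have hxk : pvX v ∈ (pvBest variety).keys := (mem_keys_pvBest variety (pvX v)).mpr ⟨v, h, rfl⟩
  rw [pvSuff_get? variety (pvX v) hxk]
  simp only [Option.getD_some]
  have hfilt : ∀ k, k ∈ (PySem.List.sorted (pvBest variety).keys (fun x => x) true).filter
      (fun k => decide (pvX v < k)) ↔ k ∈ (pvBest variety).keys ∧ pvX v < k := by
    intro k
    rw [List.mem_filter, PySem.List.mem_sorted]
    simp
  rw [Bool.eq_iff_iff]
  simp only [Bool.or_eq_true, decide_eq_true_eq, pvBad, List.any_eq_true]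
  constructor
  · rintro (hs | hlt)
    · cases hA : pvAcc variety (pvX v) with
      | none => rw [hA] at hs; simp at hs
      | some sv =>
        rw [hA] at hs
        simp at hs
        obtain ⟨-, -, hatt⟩ := pvAccF_spec _ _ none sv hA
        rcases hatt with h' | ⟨k, hk, hfk⟩
        · exact absurd h' (by simp)
        · obtain ⟨hkk, hxk'⟩ := (hfilt k).mp hk
          obtain ⟨w, hw, hwx, hwy⟩ := pvBest_attained variety k hkk
          exact ⟨w, hw, Or.inr ⟨by omega, by omega⟩⟩
    · obtain ⟨w, hw, hwx, hwy⟩ := pvBest_attained variety (pvX v) hxk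
      exact ⟨w, hw, Or.inl ⟨by omega, by omega⟩⟩
  · rintro ⟨w, hw, hcond⟩
    have hwk : pvX w ∈ (pvBest variety).keys := (mem_keys_pvBest variety (pvX w)).mpr ⟨w, hw, rfl⟩
    have hwub : pvY w ≤ (pvBest variety).getD (pvX w) 0 := pvBest_ub variety w hw
    by_cases hxx : pvX w = pvX v
    · right
      rw [hxx] at hwub
      rcases hcond with ⟨-, h1⟩ | ⟨h1, -⟩ <;> omega
    · have hxlt : pvX v < pvX w := by rcases hcond with ⟨h1, -⟩ | ⟨h1, -⟩ <;> omega
      left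
      have hmem : pvX w ∈ (PySem.List.sorted (pvBest variety).keys (fun x => x) true).filter
          (fun k => decide (pvX v < k)) := (hfilt (pvX w)).mpr ⟨hwk, hxlt⟩
      cases hA : pvAcc variety (pvX v) with
      | none =>
        rw [pvAcc_eq_none_iff] at hA
        rw [hA] at hmem
        simp at hmem
      | some sv =>
        obtain ⟨hub, -, -⟩ := pvAccF_spec _ _ none sv hA
        have := hub (pvX w) hmem
        simp
        rcases hcond with ⟨-, h1⟩ | ⟨-, h1⟩ <;> omega

theorem final_fold_eq (variety : List (List Int)) (l : List (List Int))
    (hl : ∀ v ∈ l, v ∈ variety) (res : List (List Int)) (seen : PySem.Set (List Int))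
    (hseen : ∀ u, PySem.Set.contains seen u = decide (u ∈ res)) :
    (l.foldl (fun (p : List (List Int) × PySem.Set (List Int)) v =>
      let s := ((pvSuff variety).get? (pvX v)).getD none
      let dominated := (match s with | some sv => decide (pvY v ≤ sv) | none => false)
                       || decide (pvY v < (pvBest variety).getD (pvX v) 0)
      if dominated then p
      else if PySem.Set.contains p.2 v then p
      else (p.1 ++ [v], PySem.Set.add p.2 v)) (res, seen)).1
    = l.foldl (fun res v =>
      if pvBad variety v then res else if v ∈ res then res else res ++ [v]) res := by
  induction l generalizing res seen with
  | nil => rfl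
  | cons v t ih =>
    have hv := hl v (by simp)
    simp only [List.foldl_cons]
    rw [show ((match ((pvSuff variety).get? (pvX v)).getD none with
      | some sv => decide (pvY v ≤ sv) | none => false)
     || decide (pvY v < (pvBest variety).getD (pvX v) 0)) = pvBad variety v
      from dominated_eq_bad variety v hv]
    cases hbad : pvBad variety v with
    | true => exact ih (fun w hw => hl w (by simp [hw])) res seen hseen
    | false =>
      simp only [hseen v, Bool.false_eq_true, if_false]
      by_cases hm : v ∈ res
      · simp only [if_pos hm, decide_eq_true hm, if_pos rfl]
        exact ih (fun w hw => hl w (by simp [hw])) res seen hseen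
      · simp only [if_neg hm, decide_eq_false hm]
        have : (decide (v ∈ res) : Bool) = true → False := by simp [hm]
        rw [if_neg (by simp [hm])]
        have hmemseen : ∀ u, u ∈ seen ↔ u ∈ res := fun u => by
          rw [← PySem.Set.contains_iff, hseen u, decide_eq_true_eq]
        exact ih (fun w hw => hl w (by simp [hw])) (res ++ [v]) (PySem.Set.add seen v)
          (fun u => by
            by_cases hu : u ∈ res ++ [v]
            · rw [decide_eq_true hu, PySem.Set.contains_iff, PySem.Set.mem_add, hmemseen u]
              rcases List.mem_append.mp hu with h' | h'
              · exact Or.inl h'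
              · exact Or.inr (by simpa using h')
            · rw [decide_eq_false hu]
              by_contra hcon
              have hb : (PySem.Set.add seen v).contains u = true := by
                revert hcon; cases (PySem.Set.add seen v).contains u <;> simp
              have hmem : u ∈ PySem.Set.add seen v :=
                (PySem.Set.contains_iff _ _).mp hb
              rw [PySem.Set.mem_add, hmemseen u] at hmem
              exact hu (List.mem_append.mpr (hmem.imp id (by simp))))

-- ===== VERDICT (by name: the statement is the Claim_ definition above) =====
theorem vector_filter_spec : Claim_equal_vector_filter := by
  intro variety _ _
  unfold Spec_vector_filter
  rw [vector_filter_eq_fold, vector_filter_alt,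
    final_fold_eq variety variety (fun v hv => hv) [] PySem.Set.empty (by intro u; simp [PySem.Set.contains, PySem.Set.empty])]
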